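-- pv_equiv track=rewrite | github.com/umarsulemanbhatti/Hello-World | Module_2/for/main.py | shortest_names
-- ===== SOURCE A (Python) =====
-- def shortest_names(countries):
--   shortest_names = []
--   len_country_names = [len(country) for country in countries]
--   for country in countries:
--      if len(country) == min(len_country_names):
--        shortest_names.append(country)
--        continue
--   return shortest_names
-- ===== SOURCE B (Python) =====
-- def shortest_names(countries):
--     best = None
--     result = []
--     for country in countries:
--         n = len(country)
--         if best is None or n < best:
--             best = n
--             result = [country]
--         elif n == best:
--             result.append(country)
--     return result
-- ===== Notes on version B (the rewrite author's own statement) =====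
-- stated objective: faster
-- what changed: Replaces the quadratic build-lengths-list-and-recompute-min(...)-inside-the-loop pattern with a single pass that maintains the current minimum length and a result list reset whenever a strictly shorter name appears.
import Mathlib
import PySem

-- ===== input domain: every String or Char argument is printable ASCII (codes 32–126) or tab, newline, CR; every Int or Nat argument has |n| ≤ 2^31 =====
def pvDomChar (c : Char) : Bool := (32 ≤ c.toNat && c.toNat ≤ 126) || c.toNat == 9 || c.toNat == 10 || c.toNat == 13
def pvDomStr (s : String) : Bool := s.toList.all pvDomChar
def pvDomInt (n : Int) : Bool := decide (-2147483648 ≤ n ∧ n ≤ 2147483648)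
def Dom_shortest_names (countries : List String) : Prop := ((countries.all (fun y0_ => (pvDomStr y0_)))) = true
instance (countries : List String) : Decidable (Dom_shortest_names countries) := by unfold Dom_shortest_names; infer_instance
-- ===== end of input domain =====

-- B is a single pass maintaining the running minimum length and a resetting result list,
-- replacing A's recomputation of min(lengths) inside the loop; same return value everywhere.

-- ===== PORT A =====
def shortest_names (countries : List String) : List String :=
  let len_country_names := countries.map (fun country => PySem.Str.len country)
  countries.foldl
    (fun acc country =>
      if some (PySem.Str.len country) = PySem.List.min? len_country_names (fun x => x) then
        acc ++ [country]
      else acc)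
    []

-- ===== PORT B =====
def shortest_names_alt (countries : List String) : List String :=
  (countries.foldl
    (fun (st : Option Int × List String) country =>
      let n := PySem.Str.len country
      match st.1 with
      | none => (some n, [country])
      | some best =>
        if n < best then (some n, [country])
        else if n = best then (some best, st.2 ++ [country])
        else st)
    (none, [])).2

-- ===== PRECONDITION & SPEC =====
def Spec_shortest_names (countries : List String) (out : List String) : Prop := out = shortest_names_alt countries
instance (countries : List String) (out : List String) : Decidable (Spec_shortest_names countries out) := by unfold Spec_shortest_names; infer_instance

-- ===== CLAIM (what is proved, stated in full; the proofs are below) =====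
def Claim_equal_shortest_names : Prop := ∀ (countries : List String), Dom_shortest_names countries → Spec_shortest_names countries (shortest_names countries)

-- ===== LEMMAS AND PROOFS =====

-- B's loop body, named for the proofs
def pvStep (st : Option Int × List String) (country : String) : Option Int × List String :=
  let n := PySem.Str.len country
  match st.1 with
  | none => (some n, [country])
  | some best =>
    if n < best then (some n, [country])
    else if n = best then (some best, st.2 ++ [country])
    else st

theorem shortest_names_alt_eq (countries : List String) :
    shortest_names_alt countries = (countries.foldl pvStep (none, [])).2 := rfl

-- invariant of B's fold when started from a concrete running minimum
theorem pvStep_invariant (t : List String) : ∀ (b : Int) (r : List String),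
    t.foldl pvStep (some b, r) =
      (some ((t.map PySem.Str.len).foldl min b),
       (if b = (t.map PySem.Str.len).foldl min b then r else []) ++
         t.filter (fun c => decide (PySem.Str.len c = (t.map PySem.Str.len).foldl min b))) := by
  induction t with
  | nil => intro b r; simp
  | cons c t ih =>
    intro b r
    have hle := (PySem.List.foldl_min_le (t.map PySem.Str.len) (min b (PySem.Str.len c))).1
    simp only [List.foldl_cons, List.map_cons, List.filter_cons]
    rcases lt_trichotomy (PySem.Str.len c) b with h | h | h
    · have hstep : pvStep (some b, r) c = (some (PySem.Str.len c), [c]) := by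
        simp only [pvStep]; rw [if_pos h]
      rw [hstep, ih]
      have hmin : min b (PySem.Str.len c) = PySem.Str.len c := by omega
      simp only [hmin]
      simp only [hmin] at hle
      have hb : ¬ b = (t.map PySem.Str.len).foldl min (PySem.Str.len c) := by omega
      rw [if_neg hb, List.nil_append]
      by_cases hc : PySem.Str.len c = (t.map PySem.Str.len).foldl min (PySem.Str.len c)
      · rw [if_pos hc, if_pos (by rw [decide_eq_true_eq]; exact hc)]
        rfl
      · rw [if_neg hc, if_neg (by rw [decide_eq_true_eq]; exact hc), List.nil_append]
    · have hstep : pvStep (some b, r) c = (some b, r ++ [c]) := by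
        simp only [pvStep]; rw [if_neg (by omega), if_pos h]
      rw [hstep, ih]
      have hmin : min b (PySem.Str.len c) = b := by omega
      simp only [hmin]
      by_cases hb : b = (t.map PySem.Str.len).foldl min b
      · rw [if_pos hb, if_pos hb,
            if_pos (show decide (PySem.Str.len c = (t.map PySem.Str.len).foldl min b) = true by
              rw [decide_eq_true_eq, h]; exact hb),
            List.append_assoc]
        rfl
      · rw [if_neg hb, if_neg hb,
            if_neg (show ¬ decide (PySem.Str.len c = (t.map PySem.Str.len).foldl min b) = true by
              rw [decide_eq_true_eq, h]; exact hb)]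
    · have hstep : pvStep (some b, r) c = (some b, r) := by
        simp only [pvStep]; rw [if_neg (by omega), if_neg (by omega)]
      rw [hstep, ih]
      have hmin : min b (PySem.Str.len c) = b := by omega
      simp only [hmin]
      simp only [hmin] at hle
      rw [if_neg (show ¬ decide (PySem.Str.len c = (t.map PySem.Str.len).foldl min b) = true by
            rw [decide_eq_true_eq]; omega)]

-- A as a filter against the global minimum
theorem shortest_names_cons (c : String) (t : List String) :
    shortest_names (c :: t) =
      (c :: t).filter
        (fun x => decide (PySem.Str.len x = (t.map PySem.Str.len).foldl min (PySem.Str.len c))) := by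
  unfold shortest_names
  have hmin : PySem.List.min? ((c :: t).map (fun country => PySem.Str.len country)) (fun x => x)
      = some ((t.map PySem.Str.len).foldl min (PySem.Str.len c)) := by
    rw [List.map_cons, PySem.List.min?_id_cons]
  simp only [hmin]
  have hfold := PySem.List.foldl_append_ite
    (l := c :: t)
    (p := fun x => some (PySem.Str.len x) = some ((t.map PySem.Str.len).foldl min (PySem.Str.len c)))
    (f := fun x => x) (acc := [])
  simp only [hfold, List.nil_append]
  rw [List.map_id']
  apply List.filter_congr
  intro x _
  simp

-- ===== VERDICT (by name: the statement is the Claim_ definition above) =====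
theorem shortest_names_spec : Claim_equal_shortest_names := by
  intro countries _
  unfold Spec_shortest_names
  cases countries with
  | nil => rfl
  | cons c t =>
    rw [shortest_names_alt_eq, List.foldl_cons,
        show pvStep (none, []) c = (some (PySem.Str.len c), [c]) from rfl,
        pvStep_invariant, shortest_names_cons, List.filter_cons]
    by_cases hc : PySem.Str.len c = (t.map PySem.Str.len).foldl min (PySem.Str.len c)
    · rw [if_pos (by rw [decide_eq_true_eq]; exact hc), if_pos hc]
      rfl
    · rw [if_neg (by rw [decide_eq_true_eq]; exact hc), if_neg hc, List.nil_append]
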